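-- pv_equiv track=rewrite | github.com/RESMP-DEV/metal-marlin | metal_marlin/calibration.py | _parse_v3_text
-- ===== SOURCE A (Python) =====
-- def _parse_v3_text(text: str, min_length: int) -> list[str]:
--     """Parse v3 format: blank-line separated paragraphs.
--
--     Consecutive non-blank lines are joined into samples.
--     """
--     samples = []
--     current = []
--
--     for line in text.split("\n"):
--         stripped = line.strip()
--         if not stripped:
--             # Blank line: end of sample
--             if current:
--                 sample = "\n".join(current)
--                 if len(sample) >= min_length:
--                     samples.append(sample)
--                 current = []
--         else:
--             current.append(line)
--
--     # Handle last sample without trailing blank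
--     if current:
--         sample = "\n".join(current)
--         if len(sample) >= min_length:
--             samples.append(sample)
--
--     return samples
-- ===== SOURCE B (Python) =====
-- def _parse_v3_text(text: str, min_length: int) -> list[str]:
--     """Two-pointer scan over the line list: each maximal run of non-blank
--     lines [i:j] is joined directly, with no current-accumulator/flush logic."""
--     lines = text.split("\n")
--     n = len(lines)
--     samples = []
--     i = 0
--     while i < n:
--         if not lines[i].strip():
--             i += 1
--             continue
--         j = i + 1
--         while j < n and lines[j].strip():
--             j += 1
--         sample = "\n".join(lines[i:j])
--         if len(sample) >= min_length:
--             samples.append(sample)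
--         i = j
--     return samples
-- ===== Notes on version B (the rewrite author's own statement) =====
-- stated objective: alternative
-- what changed: Replaces A's per-line accumulator with flush-on-blank-and-at-end by a two-pointer scan that locates each maximal run of non-blank lines [i:j] and joins it in one step, with no current list and no duplicated trailing flush.
import Mathlib
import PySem

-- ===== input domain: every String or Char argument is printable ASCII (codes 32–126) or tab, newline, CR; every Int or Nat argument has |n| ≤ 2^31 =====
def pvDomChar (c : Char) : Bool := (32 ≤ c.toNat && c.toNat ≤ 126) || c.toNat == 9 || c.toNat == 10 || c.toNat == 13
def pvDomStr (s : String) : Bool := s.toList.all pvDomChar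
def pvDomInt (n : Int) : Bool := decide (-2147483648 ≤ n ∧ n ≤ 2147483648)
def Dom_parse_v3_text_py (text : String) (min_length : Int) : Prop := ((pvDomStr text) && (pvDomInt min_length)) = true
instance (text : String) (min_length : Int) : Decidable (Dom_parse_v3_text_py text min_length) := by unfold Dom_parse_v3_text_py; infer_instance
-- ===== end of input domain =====

-- B is an alternative decomposition: a two-pointer scan joining each maximal non-blank run directly,
-- instead of A's accumulator with flush-on-blank plus a duplicated trailing flush.

-- ===== PORT A =====
-- literal transliteration of A: foldl over the lines carrying (samples, current), then the trailing flush
def parse_v3_text_py (text : String) (min_length : Int) : List String :=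
  let fin := ((PySem.Str.split? text "\n").getD []).foldl
    (fun (st : List String × List String) (line : String) =>
      if PySem.Str.strip line == "" then
        if st.2.isEmpty then st
        else
          let sample := PySem.Str.join "\n" st.2
          ((if min_length ≤ PySem.Str.len sample then st.1 ++ [sample] else st.1), [])
      else (st.1, st.2 ++ [line]))
    ([], [])
  if fin.2.isEmpty then fin.1
  else
    let sample := PySem.Str.join "\n" fin.2
    if min_length ≤ PySem.Str.len sample then fin.1 ++ [sample] else fin.1

-- ===== PORT B =====
-- B-side helper: the outer while loop of Source B; lines.takeWhile/dropWhile locate the run lines[i:j]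
def pvRunsB (min_length : Int) : List String → List String
  | [] => []
  | l :: ls =>
    if PySem.Str.strip l == "" then pvRunsB min_length ls
    else
      let run := l :: ls.takeWhile (fun x => !(PySem.Str.strip x == ""))
      let rest := ls.dropWhile (fun x => !(PySem.Str.strip x == ""))
      let sample := PySem.Str.join "\n" run
      (if min_length ≤ PySem.Str.len sample then [sample] else []) ++ pvRunsB min_length rest
termination_by ls => ls.length
decreasing_by
  all_goals simp only [List.length_cons]
  · omega
  · exact Nat.lt_succ_of_le (List.length_dropWhile_le _ _)

def parse_v3_text_py_alt (text : String) (min_length : Int) : List String :=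
  pvRunsB min_length ((PySem.Str.split? text "\n").getD [])

-- ===== PRECONDITION & SPEC =====
def Spec_parse_v3_text_py (text : String) (min_length : Int) (out : List String) : Prop := out = parse_v3_text_py_alt text min_length
instance (text : String) (min_length : Int) (out : List String) : Decidable (Spec_parse_v3_text_py text min_length out) := by unfold Spec_parse_v3_text_py; infer_instance

-- ===== CLAIM (what is proved, stated in full; the proofs are below) =====
def Claim_equal_parse_v3_text_py : Prop := ∀ (text : String) (min_length : Int), Dom_parse_v3_text_py text min_length → Spec_parse_v3_text_py text min_length (parse_v3_text_py text min_length)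

-- ===== LEMMAS AND PROOFS =====

-- proof-side names for the pieces of port A
def pvStepA (min_length : Int) (st : List String × List String) (line : String) : List String × List String :=
  if PySem.Str.strip line == "" then
    if st.2.isEmpty then st
    else
      let sample := PySem.Str.join "\n" st.2
      ((if min_length ≤ PySem.Str.len sample then st.1 ++ [sample] else st.1), [])
  else (st.1, st.2 ++ [line])

def pvEmit (min_length : Int) (samples run : List String) : List String :=
  if min_length ≤ PySem.Str.len (PySem.Str.join "\n" run) then samples ++ [PySem.Str.join "\n" run] else samples

def pvFinish (min_length : Int) (st : List String × List String) : List String :=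
  if st.2.isEmpty then st.1 else pvEmit min_length st.1 st.2

lemma parse_v3_eq_finish (text : String) (m : Int) :
    parse_v3_text_py text m =
      pvFinish m (((PySem.Str.split? text "\n").getD []).foldl (pvStepA m) ([], [])) := rfl

lemma pvEmit_split (m : Int) (samples run : List String) :
    pvEmit m samples run = samples ++ pvEmit m [] run := by
  unfold pvEmit; split_ifs <;> simp

lemma pv_key (m : Int) (ls : List String) :
    (∀ samples, pvFinish m (ls.foldl (pvStepA m) (samples, [])) = samples ++ pvRunsB m ls)
    ∧ (∀ samples cur, cur ≠ [] →
        pvFinish m (ls.foldl (pvStepA m) (samples, cur)) =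
          pvEmit m samples (cur ++ ls.takeWhile (fun x => !(PySem.Str.strip x == ""))) ++
            pvRunsB m (ls.dropWhile (fun x => !(PySem.Str.strip x == "")))) := by
  induction ls with
  | nil =>
    constructor
    · intro samples; simp [pvFinish, pvRunsB]
    · intro samples cur hcur
      simp [pvFinish, pvEmit, pvRunsB, List.isEmpty_iff, hcur]
  | cons l ls ih =>
    by_cases hb : PySem.Str.strip l == ""
    · constructor
      · intro samples
        simp only [List.foldl_cons, pvStepA, hb, if_pos, List.isEmpty_nil]
        rw [ih.1 samples, pvRunsB]
        simp [hb]
      · intro samples cur hcur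
        simp only [List.foldl_cons, pvStepA, hb, if_pos, List.isEmpty_iff, hcur]
        simp only [if_false]
        rw [ih.1]
        simp [List.takeWhile, List.dropWhile, hb, pvRunsB, pvEmit]
    · have hb' : (!(PySem.Str.strip l == "")) = true := by simp [hb]
      constructor
      · intro samples
        simp only [List.foldl_cons, pvStepA, hb, Bool.false_eq_true, if_false, List.nil_append]
        rw [(ih.2 samples [l] (by simp))]
        rw [pvRunsB]
        simp only [hb, Bool.false_eq_true, if_false]
        rw [pvEmit_split]
        simp [pvEmit]
      · intro samples cur hcur
        simp only [List.foldl_cons, pvStepA, hb, Bool.false_eq_true, if_false]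
        rw [ih.2 samples (cur ++ [l]) (by simp)]
        simp [List.takeWhile, List.dropWhile, hb']

-- ===== VERDICT (by name: the statement is the Claim_ definition above) =====
theorem parse_v3_text_py_spec : Claim_equal_parse_v3_text_py := by
  intro text m _
  unfold Spec_parse_v3_text_py parse_v3_text_py_alt
  rw [parse_v3_eq_finish]
  simpa using (pv_key m ((PySem.Str.split? text "\n").getD [])).1 []
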